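-- pv_equiv track=rewrite | github.com/mauriciocoder/btg | src/play_play.py | find_largest_or
-- ===== SOURCE A (Python) =====
-- def find_largest_or(a: list["int"], b: list["int"]) -> int:
--     if len(a) != len(b) or len(a) == 0:
--         raise ValueError("a and b must have the same length and be non-empty.")
--     offset_size = len(a) - 1
--     max_or = 0
--     while offset_size > 0:
--         i = 0
--         while True:
--             left = i
--             right = left + offset_size
--             if right >= len(a):
--                 break
--             a_or = 0
--             b_or = 0
--             for j in range(left, right + 1):
--                 a_or |= a[j]
--                 b_or |= b[j]
--             max_or = max(max_or, a_or + b_or)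
--             i += 1
--         offset_size -= 1
--     return max_or
-- ===== SOURCE B (Python) =====
-- def find_largest_or(a: list["int"], b: list["int"]) -> int:
--     if len(a) != len(b) or len(a) == 0:
--         raise ValueError("a and b must have the same length and be non-empty.")
--     max_or = 0
--     for left in range(len(a)):
--         a_or = a[left]
--         b_or = b[left]
--         for right in range(left + 1, len(a)):
--             a_or |= a[right]
--             b_or |= b[right]
--             max_or = max(max_or, a_or + b_or)
--     return max_or
-- ===== Notes on version B (the rewrite author's own statement) =====
-- stated objective: faster
-- what changed: B replaces A's O(n^3) sweep over window sizes (recomputing both ORs from scratch for every window) by an O(n^2) left-anchored expanding window that maintains the running ORs incrementally; Pre_ excludes only the inputs (length mismatch or empty lists) on which A raises ValueError.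
import Mathlib
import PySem

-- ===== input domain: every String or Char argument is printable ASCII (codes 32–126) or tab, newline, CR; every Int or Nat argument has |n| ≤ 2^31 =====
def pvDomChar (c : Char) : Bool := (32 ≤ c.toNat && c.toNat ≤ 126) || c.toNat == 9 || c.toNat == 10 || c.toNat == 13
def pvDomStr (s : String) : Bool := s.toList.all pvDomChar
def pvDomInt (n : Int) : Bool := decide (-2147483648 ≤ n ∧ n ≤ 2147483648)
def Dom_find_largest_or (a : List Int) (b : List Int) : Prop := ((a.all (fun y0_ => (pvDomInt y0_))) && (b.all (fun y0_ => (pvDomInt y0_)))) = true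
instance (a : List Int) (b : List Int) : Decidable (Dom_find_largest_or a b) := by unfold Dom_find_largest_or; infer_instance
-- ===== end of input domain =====

-- B replaces A's O(n^3) sweep over window sizes (ORs recomputed per window) by an O(n^2)
-- left-anchored expanding window maintaining running ORs; equal on all same-length non-empty inputs.

-- ===== PORT A =====
-- the 'for j in range(left, right + 1)' loop accumulating a_or and b_or
def pvA_pair (a : List Int) (b : List Int) (left : Int) (right : Int) : Int × Int :=
  (PySem.List.pyRange left (right + 1) 1).foldl
    (fun s j => (PySem.Int.bor s.1 (PySem.List.pyGetD a j 0),
                 PySem.Int.bor s.2 (PySem.List.pyGetD b j 0))) (0, 0)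

-- the inner 'while True' loop (i := i + 1 until right ≥ len(a))
def pvA_inner (a : List Int) (b : List Int) (offset : Nat) (i : Nat) (maxOr : Int) : Int :=
  if _h : i + offset < a.length then
    let pr := pvA_pair a b (i : Int) ((i : Int) + (offset : Int))
    pvA_inner a b offset (i + 1) (max maxOr (pr.1 + pr.2))
  else maxOr
termination_by a.length - i
decreasing_by omega

-- the outer 'while offset_size > 0' loop
def pvA_outer (a : List Int) (b : List Int) (offset : Nat) (maxOr : Int) : Int :=
  match offset with
  | 0 => maxOr
  | o + 1 => pvA_outer a b o (pvA_inner a b (o + 1) 0 maxOr)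

def find_largest_or (a : List Int) (b : List Int) : Int :=
  if a.length ≠ b.length ∨ a.length = 0 then 0   -- Python raises ValueError here (outside Pre_)
  else pvA_outer a b (a.length - 1) 0

-- ===== PORT B =====
-- the inner 'for right in range(left + 1, len(a))' loop; state = ((a_or, b_or), max_or)
def pvB_inner (a : List Int) (b : List Int) (left : Int) (maxOr : Int) : Int :=
  ((PySem.List.pyRange (left + 1) (a.length : Int) 1).foldl
    (fun s r =>
      let aor := PySem.Int.bor s.1.1 (PySem.List.pyGetD a r 0)
      let bor := PySem.Int.bor s.1.2 (PySem.List.pyGetD b r 0)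
      ((aor, bor), max s.2 (aor + bor)))
    ((PySem.List.pyGetD a left 0, PySem.List.pyGetD b left 0), maxOr)).2

def find_largest_or_alt (a : List Int) (b : List Int) : Int :=
  if a.length ≠ b.length ∨ a.length = 0 then 0   -- Python raises ValueError here (outside Pre_)
  else (PySem.List.pyRange 0 (a.length : Int) 1).foldl (fun m left => pvB_inner a b left m) 0

-- ===== PRECONDITION & SPEC =====
-- Pre_ excludes exactly the inputs on which A raises ValueError (length mismatch or empty lists)
def Pre_find_largest_or (a : List Int) (b : List Int) : Prop := a.length = b.length ∧ a ≠ []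
instance (a : List Int) (b : List Int) : Decidable (Pre_find_largest_or a b) := by unfold Pre_find_largest_or; infer_instance
def pvWitness_find_largest_or : List Int × List Int := ([1, 2], [2, 3])

def Spec_find_largest_or (a : List Int) (b : List Int) (out : Int) : Prop := out = find_largest_or_alt a b
instance (a : List Int) (b : List Int) (out : Int) : Decidable (Spec_find_largest_or a b out) := by unfold Spec_find_largest_or; infer_instance

-- ===== CLAIM (what is proved, stated in full; the proofs are below) =====
def Claim_equal_find_largest_or : Prop := ∀ (a : List Int) (b : List Int), Dom_find_largest_or a b → Pre_find_largest_or a b → Spec_find_largest_or a b (find_largest_or a b)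

-- ===== LEMMAS AND PROOFS =====

-- OR of the window a[l..r] (inclusive), as the ascending fold both programs perform
def pvOrSeg (x : List Int) (l : Nat) (r : Nat) : Int :=
  (PySem.List.pyRange (l : Int) ((r : Int) + 1) 1).foldl
    (fun s j => PySem.Int.bor s (PySem.List.pyGetD x j 0)) 0

-- the value contributed by the window pair p = (l, r)
def pvF (a : List Int) (b : List Int) (p : Nat × Nat) : Int := pvOrSeg a p.1 p.2 + pvOrSeg b p.1 p.2

-- running maximum of pvF over a list of windows
def pvM (a : List Int) (b : List Int) (m : Int) (L : List (Nat × Nat)) : Int :=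
  L.foldl (fun m p => max m (pvF a b p)) m

-- the windows A's outer loop visits, per offset bound
def pvLA (n : Nat) : Nat → List (Nat × Nat)
  | 0 => []
  | o + 1 => ((List.range' 0 (n - (o + 1))).map (fun l => (l, l + (o + 1)))) ++ pvLA n o

lemma pv_zero_bor (x : Int) : PySem.Int.bor 0 x = x := by
  rw [PySem.Int.bor_comm]; exact PySem.Int.bor_zero x

lemma pvM_cons (a b : List Int) (m : Int) (p : Nat × Nat) (L : List (Nat × Nat)) :
    pvM a b m (p :: L) = pvM a b (max m (pvF a b p)) L := rfl

lemma pvM_append (a b : List Int) (m : Int) (L1 L2 : List (Nat × Nat)) :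
    pvM a b m (L1 ++ L2) = pvM a b (pvM a b m L1) L2 := by
  simp [pvM, List.foldl_append]

lemma pv_le_M (a b : List Int) (L : List (Nat × Nat)) : ∀ m : Int, m ≤ pvM a b m L := by
  induction L with
  | nil => intro m; simp [pvM]
  | cons p L ih => intro m; rw [pvM_cons]; exact le_trans (le_max_left _ _) (ih _)

lemma pv_mem_le (a b : List Int) (L : List (Nat × Nat)) :
    ∀ (m : Int) (p : Nat × Nat), p ∈ L → pvF a b p ≤ pvM a b m L := by
  induction L with
  | nil => intro m p hp; simp at hp
  | cons q L ih =>
    intro m p hp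
    rw [pvM_cons]
    rcases List.mem_cons.1 hp with h | h
    · subst h; exact le_trans (le_max_right _ _) (pv_le_M a b L _)
    · exact ih _ p h

lemma pv_attained (a b : List Int) (L : List (Nat × Nat)) :
    ∀ m : Int, pvM a b m L = m ∨ ∃ p ∈ L, pvM a b m L = pvF a b p := by
  induction L with
  | nil => intro m; left; rfl
  | cons q L ih =>
    intro m
    rw [pvM_cons]
    rcases ih (max m (pvF a b q)) with h | ⟨p, hp, h⟩
    · rcases max_choice m (pvF a b q) with hm | hm
      · left; rw [h, hm]
      · right; exact ⟨q, List.mem_cons_self .., by rw [h, hm]⟩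
    · right; exact ⟨p, List.mem_cons_of_mem _ hp, h⟩

lemma pvM_congr (a b : List Int) (m : Int) (L L' : List (Nat × Nat))
    (h : ∀ p, p ∈ L ↔ p ∈ L') : pvM a b m L = pvM a b m L' := by
  apply le_antisymm
  · rcases pv_attained a b L m with he | ⟨p, hp, he⟩
    · rw [he]; exact pv_le_M a b L' m
    · rw [he]; exact pv_mem_le a b L' m p ((h p).1 hp)
  · rcases pv_attained a b L' m with he | ⟨p, hp, he⟩
    · rw [he]; exact pv_le_M a b L m
    · rw [he]; exact pv_mem_le a b L m p ((h p).2 hp)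

lemma pvOrSeg_self (x : List Int) (l : Nat) : pvOrSeg x l l = PySem.List.pyGetD x (l : Int) 0 := by
  unfold pvOrSeg
  rw [PySem.List.pyRange_one_singleton]
  simp [pv_zero_bor]

lemma pvOrSeg_step (x : List Int) (l r : Nat) (h : l < r) :
    pvOrSeg x l r = PySem.Int.bor (pvOrSeg x l (r - 1)) (PySem.List.pyGetD x (r : Int) 0) := by
  unfold pvOrSeg
  have hc : ((r - 1 : Nat) : Int) + 1 = (r : Int) := by omega
  rw [hc]
  rw [PySem.List.pyRange_one_succ_right (by exact_mod_cast Nat.le_of_lt h)]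
  rw [List.foldl_append]
  rfl

lemma pvA_pair_eq (a b : List Int) (l r : Nat) :
    pvA_pair a b (l : Int) (r : Int) = (pvOrSeg a l r, pvOrSeg b l r) := by
  unfold pvA_pair pvOrSeg
  rw [PySem.List.foldl_prod_mk
      (f := fun s j => PySem.Int.bor s (PySem.List.pyGetD a j 0))
      (g := fun s j => PySem.Int.bor s (PySem.List.pyGetD b j 0))]

lemma pvA_inner_eq (a b : List Int) (offset : Nat) :
    ∀ (k i : Nat) (m : Int), a.length - i ≤ k →
      pvA_inner a b offset i m
        = pvM a b m ((List.range' i (a.length - offset - i)).map (fun l => (l, l + offset))) := by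
  intro k
  induction k with
  | zero =>
    intro i m h
    rw [pvA_inner]
    have hg : ¬ (i + offset < a.length) := by omega
    have hc : a.length - offset - i = 0 := by omega
    simp [hg, hc, pvM]
  | succ k ih =>
    intro i m h
    rw [pvA_inner]
    by_cases hg : i + offset < a.length
    · simp only [dif_pos hg]
      have hcast : (i : Int) + (offset : Int) = ((i + offset : Nat) : Int) := by push_cast; ring
      rw [hcast, pvA_pair_eq]
      rw [ih (i + 1) _ (by omega)]
      have hc : a.length - offset - i = (a.length - offset - (i + 1)) + 1 := by omega
      rw [hc, List.range'_succ, List.map_cons, pvM_cons]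
      rfl
    · simp only [dif_neg hg]
      have hc : a.length - offset - i = 0 := by omega
      simp [hc, pvM]

lemma pvA_outer_eq (a b : List Int) :
    ∀ (offset : Nat) (m : Int), pvA_outer a b offset m = pvM a b m (pvLA a.length offset) := by
  intro offset
  induction offset with
  | zero => intro m; rfl
  | succ o ih =>
    intro m
    show pvA_outer a b o (pvA_inner a b (o + 1) 0 m) = _
    rw [ih, pvA_inner_eq a b (o + 1) a.length 0 m (by omega)]
    rw [pvLA, pvM_append, Nat.sub_zero]

lemma pvLA_mem (n : Nat) :
    ∀ (o : Nat) (p : Nat × Nat),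
      p ∈ pvLA n o ↔ (p.1 < p.2 ∧ p.2 ≤ p.1 + o ∧ p.2 < n) := by
  intro o
  induction o with
  | zero => intro p; simp [pvLA]; omega
  | succ o ih =>
    intro p
    rw [pvLA, List.mem_append, ih]
    constructor
    · rintro (hmem | h)
      · rcases List.mem_map.1 hmem with ⟨l, hl, rfl⟩
        rw [List.mem_range'_1] at hl
        simp only
        omega
      · omega
    · rintro ⟨h1, h2, h3⟩
      by_cases hd : p.2 = p.1 + (o + 1)
      · left
        apply List.mem_map.2
        exact ⟨p.1, List.mem_range'_1.2 (by omega), by rw [← hd]⟩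
      · right; omega

lemma pvB_loop (a b : List Int) (l : Nat) :
    ∀ (k r0 : Nat) (m : Int), l < r0 → r0 + k = a.length →
      ((PySem.List.pyRange (r0 : Int) (a.length : Int) 1).foldl
        (fun s r =>
          let aor := PySem.Int.bor s.1.1 (PySem.List.pyGetD a r 0)
          let bor := PySem.Int.bor s.1.2 (PySem.List.pyGetD b r 0)
          ((aor, bor), max s.2 (aor + bor)))
        ((pvOrSeg a l (r0 - 1), pvOrSeg b l (r0 - 1)), m))
      = ((pvOrSeg a l (a.length - 1), pvOrSeg b l (a.length - 1)),
         pvM a b m ((List.range' r0 k).map (fun r => (l, r)))) := by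
  intro k
  induction k with
  | zero =>
    intro r0 m hl hlen
    have : r0 = a.length := by omega
    subst this
    rw [PySem.List.pyRange_one_eq_nil le_rfl]
    simp [pvM]
  | succ k ih =>
    intro r0 m hl hlen
    have hlt : (r0 : Int) < (a.length : Int) := by exact_mod_cast (by omega : r0 < a.length)
    rw [PySem.List.pyRange_one_cons hlt, List.foldl_cons]
    have hstepa : PySem.Int.bor (pvOrSeg a l (r0 - 1)) (PySem.List.pyGetD a (r0 : Int) 0)
        = pvOrSeg a l r0 := (pvOrSeg_step a l r0 hl).symm
    have hstepb : PySem.Int.bor (pvOrSeg b l (r0 - 1)) (PySem.List.pyGetD b (r0 : Int) 0)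
        = pvOrSeg b l r0 := (pvOrSeg_step b l r0 hl).symm
    simp only [hstepa, hstepb]
    have hcast : (r0 : Int) + 1 = ((r0 + 1 : Nat) : Int) := by push_cast; ring
    have ih' := ih (r0 + 1) (max m (pvOrSeg a l r0 + pvOrSeg b l r0)) (by omega) (by omega)
    simp only [Nat.add_sub_cancel] at ih'
    rw [hcast, ih']
    rw [List.range'_succ, List.map_cons, pvM_cons]
    rfl

lemma pvB_inner_eq (a b : List Int) (l : Nat) (hl : l < a.length) (m : Int) :
    pvB_inner a b (l : Int) m
      = pvM a b m ((List.range' (l + 1) (a.length - (l + 1))).map (fun r => (l, r))) := by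
  unfold pvB_inner
  have hcast : (l : Int) + 1 = ((l + 1 : Nat) : Int) := by push_cast; ring
  have hinit : PySem.List.pyGetD a (l : Int) 0 = pvOrSeg a l ((l + 1) - 1) := by
    simp [pvOrSeg_self]
  have hinitb : PySem.List.pyGetD b (l : Int) 0 = pvOrSeg b l ((l + 1) - 1) := by
    simp [pvOrSeg_self]
  rw [hcast, hinit, hinitb,
    pvB_loop a b l (a.length - (l + 1)) (l + 1) m (by omega) (by omega)]

lemma pvB_fold_eq (a b : List Int) :
    ∀ (ls : List Nat) (m : Int), (∀ l ∈ ls, l < a.length) →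
      ((ls.map (Nat.cast : Nat → Int)).foldl (fun m left => pvB_inner a b left m) m)
        = pvM a b m (ls.flatMap (fun l =>
            (List.range' (l + 1) (a.length - (l + 1))).map (fun r => (l, r)))) := by
  intro ls
  induction ls with
  | nil => intro m h; simp [pvM]
  | cons l ls ih =>
    intro m h
    rw [List.map_cons, List.foldl_cons, List.flatMap_cons, pvM_append]
    rw [pvB_inner_eq a b l (h l (List.mem_cons_self ..)) m]
    exact ih _ (fun x hx => h x (List.mem_cons_of_mem _ hx))

-- ===== VERDICT (by name: the statement is the Claim_ definition above) =====
theorem find_largest_or_spec : Claim_equal_find_largest_or := by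
  intro a b _hdom hpre
  obtain ⟨hlen, hne⟩ := hpre
  have hn : 0 < a.length := List.length_pos_iff.2 hne
  unfold Spec_find_largest_or find_largest_or find_largest_or_alt
  have hguard : ¬ (a.length ≠ b.length ∨ a.length = 0) := by
    push Not; exact ⟨hlen, by omega⟩
  rw [if_neg hguard, if_neg hguard]
  rw [pvA_outer_eq]
  rw [PySem.List.pyRange_zero_nat]
  rw [pvB_fold_eq a b (List.range a.length) 0 (fun l hl => List.mem_range.1 hl)]
  apply pvM_congr
  intro p
  rw [pvLA_mem]
  simp only [List.mem_flatMap, List.mem_range, List.mem_map, List.mem_range'_1]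
  constructor
  · rintro ⟨h1, h2, h3⟩
    exact ⟨p.1, by omega, p.2, by omega, rfl⟩
  · rintro ⟨l, hl, r, hr, rfl⟩
    simp only
    omega
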